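-- pv_equiv track=rewrite | github.com/neelshekhar/instamart-roster | lib/solver_cpsat.py | ft_coverage
-- ===== SOURCE A (Python) =====
-- def ft_coverage(s, bs1, bs2):
--     """Return {raw_hour: contribution} for an FT/WFT shift starting at s.
--     raw_hour may be ≥ 24 for overnight shifts.
--     contribution = 2 for a fully productive hour, 1 if one 30-min break
--     falls within that hour (scaled by 2 for integer coverage constraints)."""
--     result = {}
--     for shift_h in range(9):
--         raw_h = s + shift_h
--         hs0 = 2 * shift_h        # :00 half-slot offset within shift
--         hs1 = 2 * shift_h + 1    # :30 half-slot offset within shift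
--         contrib = 2
--         if bs1 in (hs0, hs1):
--             contrib -= 1
--         if bs2 in (hs0, hs1):
--             contrib -= 1
--         result[raw_h] = contrib  # always > 0 (each hour has ≤ 1 break half-slot)
--     return result
-- ===== SOURCE B (Python) =====
-- def ft_coverage(s, bs1, bs2):
--     # Initialize every hour to full coverage, then point-decrement the hour
--     # of each in-range break half-slot (its hour is bs // 2).
--     result = {s + h: 2 for h in range(9)}
--     for bs in (bs1, bs2):
--         if 0 <= bs <= 17:
--             result[s + bs // 2] -= 1
--     return result
-- ===== Notes on version B (the rewrite author's own statement) =====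
-- stated objective: simpler
-- what changed: B builds the full-coverage dict {s+h: 2} first and then point-decrements only the entry at hour bs//2 for each in-range break, instead of A's per-hour pass that tests both half-slot memberships for every hour.
import Mathlib
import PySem

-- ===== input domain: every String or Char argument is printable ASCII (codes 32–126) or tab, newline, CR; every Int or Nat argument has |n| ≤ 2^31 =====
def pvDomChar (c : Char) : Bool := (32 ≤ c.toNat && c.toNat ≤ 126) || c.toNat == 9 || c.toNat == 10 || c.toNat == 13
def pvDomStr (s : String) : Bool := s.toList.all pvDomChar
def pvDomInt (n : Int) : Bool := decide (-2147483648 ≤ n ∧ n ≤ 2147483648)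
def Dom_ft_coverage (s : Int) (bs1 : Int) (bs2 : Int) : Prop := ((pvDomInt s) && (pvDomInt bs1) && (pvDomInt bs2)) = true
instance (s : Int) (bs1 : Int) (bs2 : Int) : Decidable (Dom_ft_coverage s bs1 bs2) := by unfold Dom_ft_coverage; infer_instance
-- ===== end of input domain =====

-- B initializes every hour to coverage 2 and then point-decrements the entry at
-- hour bs // 2 for each in-range break, instead of A's per-hour membership scan
-- (objective: simpler).

-- ===== PORT A =====
def ft_coverage (s : Int) (bs1 : Int) (bs2 : Int) : List (Int × Int) :=
  ((PySem.List.pyRange 0 9).foldl (fun result shift_h =>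
      let raw_h := s + shift_h
      let hs0 := 2 * shift_h
      let hs1 := 2 * shift_h + 1
      let contrib : Int := 2
      let contrib := if bs1 = hs0 ∨ bs1 = hs1 then contrib - 1 else contrib
      let contrib := if bs2 = hs0 ∨ bs2 = hs1 then contrib - 1 else contrib
      result.insert raw_h contrib) PySem.Dict.empty).items

-- ===== PORT B =====
def ft_coverage_alt (s : Int) (bs1 : Int) (bs2 : Int) : List (Int × Int) :=
  let result := (PySem.List.pyRange 0 9).foldl
      (fun d h => d.insert (s + h) (2 : Int)) PySem.Dict.empty
  -- result[s + bs // 2] -= 1 : the key is always present (0 ≤ bs ≤ 17 → bs // 2 ∈ [0,8]),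
  -- so Dict.modify is exact here.
  let result := [bs1, bs2].foldl
      (fun d bs => if 0 ≤ bs ∧ bs ≤ 17
        then d.modify (s + PySem.Int.floordiv bs 2) 0 (fun v => v - 1)
        else d) result
  result.items

-- ===== PRECONDITION & SPEC =====
def Spec_ft_coverage (s : Int) (bs1 : Int) (bs2 : Int) (out : List (Int × Int)) : Prop := out = ft_coverage_alt s bs1 bs2
instance (s : Int) (bs1 : Int) (bs2 : Int) (out : List (Int × Int)) : Decidable (Spec_ft_coverage s bs1 bs2 out) := by unfold Spec_ft_coverage; infer_instance

-- ===== CLAIM =====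
def Claim_equal_ft_coverage : Prop := ∀ (s : Int) (bs1 : Int) (bs2 : Int), Dom_ft_coverage s bs1 bs2 → Spec_ft_coverage s bs1 bs2 (ft_coverage s bs1 bs2)

-- ===== LEMMAS AND PROOFS =====

-- contribution lost in hour h by one break slot bs
def pvInd (bs h : Int) : Int := if bs = 2 * h ∨ bs = 2 * h + 1 then 1 else 0

-- An insert-fold over the 9-hour range with fresh keys s+h has items = the map of (s+h, value h).
theorem pv_fold_items (s : Int) (f : Int → Int) :
    ((PySem.List.pyRange 0 9).foldl (fun d h => d.insert (s + h) (f h)) PySem.Dict.empty).items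
      = (PySem.List.pyRange 0 9).map (fun h => (s + h, f h)) := by
  have h := PySem.Dict.items_foldl_insert_fresh (l := PySem.List.pyRange 0 9)
      (k := fun h => s + h) (v := fun h => f h) (d := PySem.Dict.empty)
      (by intro a _; simp)
      (by
        refine List.Nodup.map ?_ (PySem.List.nodup_pyRange_one 0 9)
        intro a b hab; simpa using hab)
  simpa using h

theorem pv_keys_nodup (s : Int) (g : Int → Int) (d : PySem.Dict Int Int)
    (hd : d.items = (PySem.List.pyRange 0 9).map (fun h => (s + h, g h))) :
    d.keys.Nodup := by
  have : d.keys = (PySem.List.pyRange 0 9).map (fun h => s + h) := by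
    simp [PySem.Dict.keys, hd, Function.comp]
  rw [this]
  refine List.Nodup.map ?_ (PySem.List.nodup_pyRange_one 0 9)
  intro a b hab; simpa using hab

-- One conditional point-decrement step over a dict of shape (s+h, g h).
theorem pv_step (s bs : Int) (g : Int → Int) (d : PySem.Dict Int Int)
    (hd : d.items = (PySem.List.pyRange 0 9).map (fun h => (s + h, g h))) :
    (if 0 ≤ bs ∧ bs ≤ 17
        then d.modify (s + PySem.Int.floordiv bs 2) 0 (fun v => v - 1)
        else d).items
      = (PySem.List.pyRange 0 9).map (fun h => (s + h, g h - pvInd bs h)) := by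
  by_cases hg : 0 ≤ bs ∧ bs ≤ 17
  · have hfd : PySem.Int.floordiv bs 2 = bs / 2 :=
      PySem.Int.floordiv_eq_ediv_of_pos (by norm_num)
    have hmemrange : bs / 2 ∈ PySem.List.pyRange 0 9 := by
      rw [PySem.List.mem_pyRange_one]; omega
    have hnd := pv_keys_nodup s g d hd
    have hmemitems : (s + bs / 2, g (bs / 2)) ∈ d.items := by
      rw [hd]; exact List.mem_map.mpr ⟨bs / 2, hmemrange, rfl⟩
    have hmemkeys : s + bs / 2 ∈ d.keys := by
      simp only [PySem.Dict.keys]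
      exact List.mem_map.mpr ⟨_, hmemitems, rfl⟩
    have hcont : d.contains (s + bs / 2) = true := by
      rw [PySem.Dict.contains_eq_decide_mem_keys]; simpa using hmemkeys
    have hgetD : d.getD (s + bs / 2) 0 = g (bs / 2) :=
      PySem.Dict.getD_of_mem_items d hmemitems hnd 0
    have hmodify : d.modify (s + PySem.Int.floordiv bs 2) 0 (fun v => v - 1)
        = d.insert (s + bs / 2) (g (bs / 2) - 1) := by
      rw [hfd]
      show d.insert (s + bs / 2) (d.getD (s + bs / 2) 0 - 1) = _
      rw [hgetD]
    rw [if_pos hg, hmodify, PySem.Dict.items_insert_of_contains d _ hcont, hd,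
        List.map_map]
    apply List.map_congr_left
    intro h hmem
    rw [PySem.List.mem_pyRange_one] at hmem
    by_cases hk : h = bs / 2
    · have heq : (s + h == s + bs / 2) = true := by simp [hk]
      simp only [Function.comp, heq, if_true, pvInd]
      have hcase : bs = 2 * h ∨ bs = 2 * h + 1 := by omega
      rw [if_pos hcase, hk]
    · have hne : (s + h == s + bs / 2) = false := by
        simp only [beq_eq_false_iff_ne, ne_eq]; omega
      simp only [Function.comp, hne, Bool.false_eq_true, if_false, pvInd]
      have : ¬ (bs = 2 * h ∨ bs = 2 * h + 1) := by omega
      rw [if_neg this]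
      simp
  · rw [if_neg hg, hd]
    apply List.map_congr_left
    intro h hmem
    rw [PySem.List.mem_pyRange_one] at hmem
    have : ¬ (bs = 2 * h ∨ bs = 2 * h + 1) := by
      rcases not_and_or.mp hg with h1 | h1 <;> omega
    simp [pvInd, this]

theorem ft_coverage_spec_aux (s bs1 bs2 : Int) :
    ft_coverage s bs1 bs2 = ft_coverage_alt s bs1 bs2 := by
  unfold ft_coverage ft_coverage_alt
  rw [pv_fold_items s (fun h =>
    (if bs2 = 2 * h ∨ bs2 = 2 * h + 1 then
        (if bs1 = 2 * h ∨ bs1 = 2 * h + 1 then (2 : Int) - 1 else 2) - 1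
      else (if bs1 = 2 * h ∨ bs1 = 2 * h + 1 then (2 : Int) - 1 else 2)))]
  simp only [List.foldl_cons, List.foldl_nil]
  rw [pv_step s bs2 (fun h => 2 - pvInd bs1 h) _
        (pv_step s bs1 (fun _ => 2) _ (pv_fold_items s (fun _ => 2)))]
  apply List.map_congr_left
  intro h _
  simp only [Prod.mk.injEq, true_and, pvInd]
  split_ifs <;> omega

-- ===== VERDICT =====
theorem ft_coverage_spec : Claim_equal_ft_coverage := by
  intro s bs1 bs2 _
  exact ft_coverage_spec_aux s bs1 bs2
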